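-- pv_equiv track=rewrite | github.com/xode114kr1/algorithm-study | 프로그래머스/3/42579. 베스트앨범/베스트앨범.py | solution
-- ===== SOURCE A (Python) =====
-- from collections import defaultdict
--
-- def solution(genres, plays):
--     n = len(genres)
--     dic = defaultdict(list)
--     dic_cnt = defaultdict(int)
--
--     for i in range(n):
--         genre, play = genres[i], plays[i]
--         dic_cnt[genre] += play
--         dic[genre].append((play, i))
--
--     lst_dic_cnt = list(dic_cnt.items())
--     lst_dic_cnt.sort(key = lambda x : -x[1])
--
--     ans = []
--     for g, _ in lst_dic_cnt:
--         lst = dic[g]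
--         lst.sort(key = lambda x : (-x[0], x[1]))
--         for i, (num, idx) in enumerate(lst):
--             if i >= 2 : break
--             ans.append(idx)
--     return ans
-- ===== SOURCE B (Python) =====
-- def solution(genres, plays):
--     n = len(genres)
--     total = {}
--     first_seen = {}
--     for i in range(n):
--         g = genres[i]
--         if g in total:
--             total[g] += plays[i]
--         else:
--             total[g] = plays[i]
--             first_seen[g] = i
--     order = sorted(range(n), key=lambda i: (-total[genres[i]], first_seen[genres[i]], -plays[i], i))
--     ans = []
--     emitted = {}
--     for i in order:
--         g = genres[i]
--         c = emitted.get(g, 0)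
--         if c < 2:
--             ans.append(i)
--             emitted[g] = c + 1
--     return ans
-- ===== Notes on version B (the rewrite author's own statement) =====
-- stated objective: alternative
-- what changed: B replaces A's sort of the genre totals plus a separate stable sort of each genre's (play, index) list by one global sort of all song indices under a lexicographic key (-genre_total, first_seen, -play, index) followed by a single counted pass that emits at most two indices per genre.
import Mathlib
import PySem

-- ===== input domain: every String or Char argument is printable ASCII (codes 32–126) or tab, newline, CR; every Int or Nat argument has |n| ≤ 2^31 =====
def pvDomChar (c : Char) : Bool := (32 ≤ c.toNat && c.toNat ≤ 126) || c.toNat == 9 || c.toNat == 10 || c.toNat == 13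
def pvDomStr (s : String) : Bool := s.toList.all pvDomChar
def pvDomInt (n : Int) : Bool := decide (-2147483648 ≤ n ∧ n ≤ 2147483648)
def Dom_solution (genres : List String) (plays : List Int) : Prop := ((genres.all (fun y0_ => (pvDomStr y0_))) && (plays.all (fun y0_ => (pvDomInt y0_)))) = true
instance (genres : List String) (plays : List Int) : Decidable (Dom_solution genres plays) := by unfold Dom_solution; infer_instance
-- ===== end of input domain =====

-- B replaces A's per-genre sorts by ONE global sort of the indices under a lexicographic
-- 4-tuple key plus a counted single pass (objective: alternative decomposition, same cost class).

-- ===== PORT A =====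
-- A's 'for i, (num, idx) in enumerate(lst): if i >= 2: break; ans.append(idx)'
def solutionTop2 : Nat → List (Int × Int) → List Int → List Int
  | _, [], ans => ans
  | i, p :: rest, ans => if i ≥ 2 then ans else solutionTop2 (i+1) rest (ans ++ [p.2])

def solution (genres : List String) (plays : List Int) : List Int :=
  let n : Int := genres.length
  let st := (PySem.List.pyRange 0 n 1).foldl
    (fun (st : PySem.Dict String (List (Int × Int)) × PySem.Dict String Int) i =>
      let genre := PySem.List.pyGetD genres i ""
      let play := PySem.List.pyGetD plays i 0
      (st.1.modify genre [] (fun l => l ++ [(play, i)]), st.2.modify genre 0 (fun c => c + play)))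
    (PySem.Dict.empty, PySem.Dict.empty)
  let lst := PySem.List.sorted st.2.items (fun x => -x.2) false
  lst.foldl (fun ans gp =>
      solutionTop2 0 (PySem.List.sorted2 (st.1.getD gp.1 []) (fun x => -x.1) (fun x => x.2) false) ans)
    []

-- ===== PORT B =====
def solution_alt (genres : List String) (plays : List Int) : List Int :=
  let n : Int := genres.length
  let st := (PySem.List.pyRange 0 n 1).foldl
    (fun (st : PySem.Dict String Int × PySem.Dict String Int) i =>
      let g := PySem.List.pyGetD genres i ""
      if st.1.contains g then
        (st.1.modify g 0 (fun c => c + PySem.List.pyGetD plays i 0), st.2)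
      else
        (st.1.insert g (PySem.List.pyGetD plays i 0), st.2.insert g i))
    (PySem.Dict.empty, PySem.Dict.empty)
  let order := PySem.List.sorted (PySem.List.pyRange 0 n 1)
    (fun i => toLex (-(st.1.getD (PySem.List.pyGetD genres i "") 0),
       toLex ((st.2.getD (PySem.List.pyGetD genres i "") 0),
       toLex (-(PySem.List.pyGetD plays i 0), i)))) false
  (order.foldl (fun (st2 : List Int × PySem.Dict String Int) i =>
      let g := PySem.List.pyGetD genres i ""
      let c := st2.2.getD g 0
      if c < 2 then (st2.1 ++ [i], st2.2.insert g (c + 1)) else st2)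
    ([], PySem.Dict.empty)).1

-- ===== PRECONDITION & SPEC =====
-- Pre_ excludes exactly the inputs where A raises IndexError: plays shorter than genres.
def Pre_solution (genres : List String) (plays : List Int) : Prop :=
  genres.length ≤ plays.length
instance (genres : List String) (plays : List Int) : Decidable (Pre_solution genres plays) := by unfold Pre_solution; infer_instance

def pvWitness_solution : List String × List Int := (["rock", "pop", "rock"], [10, 20, 5])

def Spec_solution (genres : List String) (plays : List Int) (out : List Int) : Prop := out = solution_alt genres plays
instance (genres : List String) (plays : List Int) (out : List Int) : Decidable (Spec_solution genres plays out) := by unfold Spec_solution; infer_instance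

-- ===== CLAIM (what is proved, stated in full; the proofs are below) =====
def Claim_equal_solution : Prop := ∀ (genres : List String) (plays : List Int), Dom_solution genres plays → Pre_solution genres plays → Spec_solution genres plays (solution genres plays)

-- ===== LEMMAS AND PROOFS =====

-- Abbreviations for the shared mathematical content of both programs.
def gOf (genres : List String) (i : Int) : String := PySem.List.pyGetD genres i ""
def pOf (plays : List Int) (i : Int) : Int := PySem.List.pyGetD plays i 0
def Rng (j : Nat) : List Int := PySem.List.pyRange 0 (j : Int) 1
def Idxs (genres : List String) (j : Nat) (g : String) : List Int :=
  (Rng j).filter (fun i => gOf genres i == g)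
def Kof (genres : List String) (j : Nat) : List String :=
  PySem.Set.ofList ((Rng j).map (gOf genres))
def Tof (genres : List String) (plays : List Int) (j : Nat) (g : String) : Int :=
  ((Idxs genres j g).map (pOf plays)).sum
def Fof (genres : List String) (j : Nat) (g : String) : Int := (Idxs genres j g).headD 0
def Lp (genres : List String) (plays : List Int) (j : Nat) (g : String) : List (Int × Int) :=
  (Idxs genres j g).map (fun i => (pOf plays i, i))
def SLf (genres : List String) (plays : List Int) (j : Nat) (g : String) : List (Int × Int) :=
  PySem.List.sorted2 (Lp genres plays j g) (fun x => -x.1) (fun x => x.2) false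
def GOf (genres : List String) (plays : List Int) (j : Nat) : List String :=
  PySem.List.sorted (Kof genres j) (fun g => toLex (-(Tof genres plays j g), Fof genres j g)) false
def canon (genres : List String) (plays : List Int) : List Int :=
  (GOf genres plays genres.length).flatMap
    (fun g => ((SLf genres plays genres.length g).take 2).map (fun x => x.2))

-- ---------- generic list/sort lemmas ----------

theorem insertBy_congr {α : Type} (b1 b2 : α → α → Bool) (x : α) (ys : List α)
    (h : ∀ y ∈ ys, b1 x y = b2 x y) :
    PySem.List.insertBy b1 x ys = PySem.List.insertBy b2 x ys := by
  induction ys with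
  | nil => rfl
  | cons y ys ih =>
    simp only [PySem.List.insertBy]
    rw [h y (by simp), ih (fun z hz => h z (by simp [hz]))]


theorem map_insertBy {α β : Type} (f : α → β) (bf : β → β → Bool) (x : α) (ys : List α) :
    PySem.List.insertBy bf (f x) (ys.map f) =
      (PySem.List.insertBy (fun a c => bf (f a) (f c)) x ys).map f := by
  induction ys with
  | nil => rfl
  | cons y ys ih =>
    simp only [List.map_cons, PySem.List.insertBy]
    by_cases hb : bf (f x) (f y) <;> simp [hb, ih]


theorem sorted_map_aux {α β κ : Type} [LinearOrder κ] (f : α → β) (key : β → κ) (l : List α) :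
    ∀ acc : List α,
    (l.map f).foldl (fun acc x => PySem.List.insertBy (fun a b => decide (key a < key b)) x acc) (acc.map f)
      = (l.foldl (fun acc x => PySem.List.insertBy (fun a b => decide (key (f a) < key (f b))) x acc) acc).map f := by
  induction l with
  | nil => intro acc; rfl
  | cons x l ih =>
    intro acc
    simp only [List.map_cons, List.foldl_cons]
    rw [map_insertBy f _ x acc, ih]

theorem sorted_map {α β κ : Type} [LinearOrder κ] (f : α → β) (l : List α) (key : β → κ) :
    PySem.List.sorted (l.map f) key false =
      (PySem.List.sorted l (fun a => key (f a)) false).map f := by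
  rw [PySem.List.sorted_eq_foldl_insertBy, PySem.List.sorted_eq_foldl_insertBy]
  exact sorted_map_aux f key l []

theorem stable_lex_aux {α κ : Type} [LinearOrder κ] (k : α → κ) (pos : α → Int) (l : List α) :
    ∀ acc : List α, (∀ y ∈ acc, ∀ z ∈ l, pos y < pos z) →
    l.Pairwise (fun a b => pos a < pos b) →
    l.foldl (fun acc x => PySem.List.insertBy (fun a b => decide (k a < k b)) x acc) acc
      = l.foldl (fun acc x => PySem.List.insertBy
          (fun a b => decide (toLex (k a, pos a) < toLex (k b, pos b))) x acc) acc := by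
  induction l with
  | nil => intro _ _ _; rfl
  | cons x l ih =>
    intro acc hacc hpw
    simp only [List.foldl_cons]
    have hpw' := List.pairwise_cons.mp hpw
    have hins : PySem.List.insertBy (fun a b => decide (k a < k b)) x acc
        = PySem.List.insertBy (fun a b => decide (toLex (k a, pos a) < toLex (k b, pos b))) x acc := by
      apply insertBy_congr
      intro y hy
      have hyx : pos y < pos x := hacc y hy x (by simp)
      apply decide_eq_decide.mpr
      rw [Prod.Lex.lt_iff]
      constructor
      · intro h; exact Or.inl h
      · rintro (h | ⟨-, h⟩)
        · exact h
        · exact absurd (lt_trans hyx h) (lt_irrefl _)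
    rw [hins]
    apply ih
    · intro y hy z hz
      rcases (PySem.List.mem_insertBy _ x y acc).mp hy with rfl | hy'
      · exact hpw'.1 z hz
      · exact hacc y hy' z (by simp [hz])
    · exact hpw'.2

theorem stable_lex {α κ : Type} [LinearOrder κ] (k : α → κ) (pos : α → Int) (l : List α)
    (h : l.Pairwise (fun a b => pos a < pos b)) :
    PySem.List.sorted l k false =
      PySem.List.sorted l (fun x => toLex (k x, pos x)) false := by
  rw [PySem.List.sorted_eq_foldl_insertBy, PySem.List.sorted_eq_foldl_insertBy]
  exact stable_lex_aux k pos l [] (by simp) h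

theorem sorted2_eq_sorted_lex {α κ₁ κ₂ : Type} [LinearOrder κ₁] [LinearOrder κ₂]
    (xs : List α) (k1 : α → κ₁) (k2 : α → κ₂) :
    PySem.List.sorted2 xs k1 k2 false =
      PySem.List.sorted xs (fun x => toLex (k1 x, k2 x)) false := by
  have hbef : (fun (a b : α) => decide (k1 a < k1 b) || (!decide (k1 b < k1 a) && decide (k2 a < k2 b)))
      = fun a b => decide (toLex (k1 a, k2 a) < toLex (k1 b, k2 b)) := by
    funext a b
    by_cases h1 : k1 a < k1 b
    · simp [h1, Prod.Lex.lt_iff]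
    · by_cases h2 : k1 b < k1 a
      · simp [h1, h2, Prod.Lex.lt_iff, le_antisymm_iff, not_le.mpr h2]
      · have he : k1 a = k1 b := le_antisymm (not_lt.mp h2) (not_lt.mp h1)
        by_cases h3 : k2 a < k2 b <;> simp [h3, Prod.Lex.lt_iff, he]
  simp only [PySem.List.sorted2, PySem.List.sorted]
  rw [hbef]
  simp

theorem partition_perm {α κ : Type} [DecidableEq κ] (key : α → κ) (l : List α) (ks : List κ)
    (hnd : ks.Nodup) (hcov : ∀ x ∈ l, key x ∈ ks) :
    l.Perm (ks.flatMap (fun k => l.filter (fun x => decide (key x = k)))) := by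
  induction l with
  | nil => simp
  | cons x l ih =>
    obtain ⟨s, t, rfl⟩ := List.append_of_mem (hcov x (by simp))
    have hxs : key x ∉ s := by
      intro hmem
      exact (List.disjoint_of_nodup_append hnd) hmem (by simp)
    have hxt : key x ∉ t := by
      have := (List.nodup_append.mp hnd).2.1
      simp at this; exact this.1
    have hs : s.flatMap (fun k => (x :: l).filter (fun y => decide (key y = k)))
        = s.flatMap (fun k => l.filter (fun y => decide (key y = k))) := by
      apply List.flatMap_congr  -- may not exist; fallback below
      intro k hk
      have : ¬ (key x = k) := fun h => hxs (h ▸ hk)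
      simp [this]
    have ht : t.flatMap (fun k => (x :: l).filter (fun y => decide (key y = k)))
        = t.flatMap (fun k => l.filter (fun y => decide (key y = k))) := by
      apply List.flatMap_congr
      intro k hk
      have : ¬ (key x = k) := fun h => hxt (h ▸ hk)
      simp [this]
    have hx : (x :: l).filter (fun y => decide (key y = key x))
        = x :: l.filter (fun y => decide (key y = key x)) := by
      simp
    have hIH := ih (fun y hy => hcov y (by simp [hy]))
    rw [List.flatMap_append, List.flatMap_cons, hs, ht, hx]
    rw [List.flatMap_append, List.flatMap_cons] at hIH
    exact (hIH.cons x).trans List.perm_middle.symm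

-- ---------- dict lemmas specific to the two loops ----------

theorem getD_foldl_modify_add {α : Type} (k : α → String) (v : α → Int) (l : List α)
    (d : PySem.Dict String Int) (g : String) :
    (l.foldl (fun d x => d.modify (k x) 0 (fun c => c + v x)) d).getD g 0 =
      d.getD g 0 + ((l.filter (fun x => k x == g)).map v).sum := by
  induction l generalizing d with
  | nil => simp
  | cons x l ih =>
    simp only [List.foldl_cons, List.filter_cons]
    rw [ih]
    unfold PySem.Dict.modify
    rw [PySem.Dict.getD_insert]
    by_cases h : k x = g
    · simp [h]
      ring
    · simp [h, beq_iff_eq, Ne.symm h]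


-- ---------- index-range / genre bookkeeping ----------

theorem gOf_def (genres : List String) (i : Int) : PySem.List.pyGetD genres i "" = gOf genres i := rfl
theorem pOf_def (plays : List Int) (i : Int) : PySem.List.pyGetD plays i 0 = pOf plays i := rfl

theorem Rng_zero : Rng 0 = [] := rfl

theorem Rng_succ (j : Nat) : Rng (j+1) = Rng j ++ [(j:Int)] := by
  unfold Rng; push_cast; rw [PySem.List.pyRange_one_succ_right (by positivity)]

theorem Rng_nodup (j : Nat) : (Rng j).Nodup := by
  unfold Rng; rw [PySem.List.pyRange_zero_natCast]
  exact List.Nodup.map (fun a b h => by exact_mod_cast h) (List.nodup_range)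

theorem mem_Rng (j : Nat) (i : Int) : i ∈ Rng j ↔ 0 ≤ i ∧ i < j := PySem.List.mem_pyRange_one

theorem mem_Idxs (genres : List String) (j : Nat) (g : String) (i : Int) :
    i ∈ Idxs genres j g ↔ (0 ≤ i ∧ i < j) ∧ gOf genres i = g := by
  simp [Idxs, List.mem_filter, mem_Rng]

theorem mem_Kof (genres : List String) (j : Nat) (g : String) :
    g ∈ Kof genres j ↔ ∃ i, (0 ≤ i ∧ i < (j:Int)) ∧ gOf genres i = g := by
  unfold Kof
  rw [PySem.Set.mem_ofList]
  simp [mem_Rng j]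

theorem Idxs_eq_nil (genres : List String) (j : Nat) (g : String) :
    Idxs genres j g = [] ↔ g ∉ Kof genres j := by
  rw [mem_Kof]
  unfold Idxs
  rw [List.filter_eq_nil_iff]
  constructor
  · rintro h ⟨i, hi, rfl⟩
    exact h i ((mem_Rng j i).mpr hi) (by simp)
  · intro h i hi hbeq
    exact h ⟨i, (mem_Rng j i).mp hi, by simpa using hbeq⟩

theorem Kof_nodup (genres : List String) (j : Nat) : (Kof genres j).Nodup :=
  PySem.Set.nodup_ofList _

theorem Idxs_succ (genres : List String) (j : Nat) (g : String) :
    Idxs genres (j+1) g =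
      Idxs genres j g ++ (if gOf genres (j:Int) = g then [(j:Int)] else []) := by
  unfold Idxs
  rw [Rng_succ, List.filter_append]
  by_cases h : gOf genres (j:Int) = g <;> simp [h]

theorem Kof_succ (genres : List String) (j : Nat) :
    Kof genres (j+1) = PySem.Set.add (Kof genres j) (gOf genres (j:Int)) := by
  unfold Kof
  rw [Rng_succ, List.map_append, PySem.Set.ofList_eq_foldl, PySem.Set.ofList_eq_foldl,
    List.foldl_append]
  rfl

theorem Kof_succ_mem (genres : List String) (j : Nat) (h : gOf genres (j:Int) ∈ Kof genres j) :
    Kof genres (j+1) = Kof genres j := by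
  rw [Kof_succ]
  unfold PySem.Set.add
  rw [if_pos]
  simpa [PySem.Set.contains] using h

theorem Kof_succ_new (genres : List String) (j : Nat) (h : gOf genres (j:Int) ∉ Kof genres j) :
    Kof genres (j+1) = Kof genres j ++ [gOf genres (j:Int)] := by
  rw [Kof_succ]
  unfold PySem.Set.add
  rw [if_neg]
  simpa [PySem.Set.contains] using h

theorem Tof_succ (genres : List String) (plays : List Int) (j : Nat) (g : String) :
    Tof genres plays (j+1) g =
      Tof genres plays j g + (if gOf genres (j:Int) = g then pOf plays (j:Int) else 0) := by
  unfold Tof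
  rw [Idxs_succ, List.map_append, List.sum_append]
  by_cases h : gOf genres (j:Int) = g <;> simp [h]

theorem Fof_succ_mem (genres : List String) (j : Nat) (g : String) (h : g ∈ Kof genres j) :
    Fof genres (j+1) g = Fof genres j g := by
  unfold Fof
  rw [Idxs_succ]
  have hne : Idxs genres j g ≠ [] := fun hnil => ((Idxs_eq_nil genres j g).mp hnil) h
  cases hI : Idxs genres j g with
  | nil => exact absurd hI hne
  | cons a l => simp

theorem Fof_succ_new (genres : List String) (j : Nat) (g : String) (h : g ∉ Kof genres j)
    (hg : gOf genres (j:Int) = g) : Fof genres (j+1) g = (j:Int) := by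
  unfold Fof
  rw [Idxs_succ, (Idxs_eq_nil genres j g).mpr h, hg]
  simp

theorem Fof_mem (genres : List String) (j : Nat) (g : String) (h : g ∈ Kof genres j) :
    Fof genres j g ∈ Idxs genres j g := by
  have hne : Idxs genres j g ≠ [] := fun hnil => ((Idxs_eq_nil genres j g).mp hnil) h
  unfold Fof
  cases hI : Idxs genres j g with
  | nil => exact absurd hI hne
  | cons a l => simp

theorem Fof_inj (genres : List String) (j : Nat) (g g' : String) (h : g ∈ Kof genres j)
    (h' : g' ∈ Kof genres j) (heq : Fof genres j g = Fof genres j g') : g = g' := by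
  have h1 := (mem_Idxs genres j g _).mp (Fof_mem genres j g h)
  have h2 := (mem_Idxs genres j g' _).mp (Fof_mem genres j g' h')
  rw [← h1.2, ← h2.2, heq]

theorem KFpairwise (genres : List String) (j : Nat) :
    (Kof genres j).Pairwise (fun a b => Fof genres j a < Fof genres j b) ∧
      ∀ g ∈ Kof genres j, Fof genres j g < (j:Int) := by
  induction j with
  | zero => constructor <;> simp [Kof, Rng_zero, PySem.Set.ofList_eq_foldl]
  | succ j ih =>
    by_cases hmem : gOf genres (j:Int) ∈ Kof genres j
    · rw [Kof_succ_mem genres j hmem]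
      constructor
      · exact ih.1.imp_of_mem (fun {a b} ha hb hab => by
          rw [Fof_succ_mem genres j a ha, Fof_succ_mem genres j b hb]; exact hab)
      · intro g hg
        rw [Fof_succ_mem genres j g hg]
        calc Fof genres j g < (j:Int) := ih.2 g hg
          _ < ((j+1:Nat):Int) := by push_cast; omega
    · rw [Kof_succ_new genres j hmem]
      constructor
      · rw [List.pairwise_append]
        refine ⟨ih.1.imp_of_mem (fun {a b} ha hb hab => by
            rw [Fof_succ_mem genres j a ha, Fof_succ_mem genres j b hb]; exact hab),
          by simp, ?_⟩
        intro a ha b hb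
        simp only [List.mem_singleton] at hb
        subst hb
        rw [Fof_succ_mem genres j a ha, Fof_succ_new genres j _ hmem rfl]
        exact ih.2 a ha
      · intro g hg
        rcases List.mem_append.mp hg with hg' | hg'
        · rw [Fof_succ_mem genres j g hg']
          calc Fof genres j g < (j:Int) := ih.2 g hg'
            _ < ((j+1:Nat):Int) := by push_cast; omega
        · simp only [List.mem_singleton] at hg'
          subst hg'
          rw [Fof_succ_new genres j _ hmem rfl]
          push_cast; omega

-- ---------- the dictionaries built by B's first loop ----------

theorem Bdicts (genres : List String) (plays : List Int) (j : Nat) :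
    ((Rng j).foldl (fun (st : PySem.Dict String Int × PySem.Dict String Int) i =>
        if st.1.contains (gOf genres i) then
          (st.1.modify (gOf genres i) 0 (fun c => c + pOf plays i), st.2)
        else
          (st.1.insert (gOf genres i) (pOf plays i), st.2.insert (gOf genres i) i))
      (PySem.Dict.empty, PySem.Dict.empty)).1.items
      = (Kof genres j).map (fun g => (g, Tof genres plays j g)) ∧
    ((Rng j).foldl (fun (st : PySem.Dict String Int × PySem.Dict String Int) i =>
        if st.1.contains (gOf genres i) then
          (st.1.modify (gOf genres i) 0 (fun c => c + pOf plays i), st.2)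
        else
          (st.1.insert (gOf genres i) (pOf plays i), st.2.insert (gOf genres i) i))
      (PySem.Dict.empty, PySem.Dict.empty)).2.items
      = (Kof genres j).map (fun g => (g, Fof genres j g)) := by
  induction j with
  | zero =>
    constructor <;> simp [Rng_zero, Kof, PySem.Set.ofList_eq_foldl, PySem.Dict.empty]
  | succ j ih =>
    obtain ⟨h1, h2⟩ := ih
    rw [Rng_succ, List.foldl_append, List.foldl_cons, List.foldl_nil]
    set P := ((Rng j).foldl (fun (st : PySem.Dict String Int × PySem.Dict String Int) i =>
        if st.1.contains (gOf genres i) then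
          (st.1.modify (gOf genres i) 0 (fun c => c + pOf plays i), st.2)
        else
          (st.1.insert (gOf genres i) (pOf plays i), st.2.insert (gOf genres i) i))
      (PySem.Dict.empty, PySem.Dict.empty)) with hP
    have hkeys1 : P.1.keys = Kof genres j := by
      simp [PySem.Dict.keys, h1, List.map_map, Function.comp_def]
    have hkeys2 : P.2.keys = Kof genres j := by
      simp [PySem.Dict.keys, h2, List.map_map, Function.comp_def]
    have hnd1 : P.1.keys.Nodup := by rw [hkeys1]; exact Kof_nodup genres j
    by_cases hmem : gOf genres (j:Int) ∈ Kof genres j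
    · have hcont : P.1.contains (gOf genres (j:Int)) = true :=
        (PySem.Dict.contains_iff_mem_keys _ _).mpr (by rw [hkeys1]; exact hmem)
      simp only [hcont, if_true]
      have hget : P.1.getD (gOf genres (j:Int)) 0 = Tof genres plays j (gOf genres (j:Int)) :=
        PySem.Dict.getD_of_mem_items _
          (by rw [h1]; exact List.mem_map_of_mem hmem) hnd1 0
      constructor
      · unfold PySem.Dict.modify
        rw [PySem.Dict.items_insert_of_contains _ _ hcont, h1, List.map_map,
          Kof_succ_mem genres j hmem]
        apply List.map_congr_left
        intro g' hg'
        by_cases he : g' = gOf genres (j:Int)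
        · subst he
          simp [Tof_succ, hget]
        · have hbeq : (g' == gOf genres (j:Int)) = false := by simpa using he
          simp [Tof_succ, Ne.symm he, he]
      · rw [h2, Kof_succ_mem genres j hmem]
        apply List.map_congr_left
        intro g' hg'
        rw [Fof_succ_mem genres j g' hg']
    · have hcont : P.1.contains (gOf genres (j:Int)) = false := by
        have : ¬ (P.1.contains (gOf genres (j:Int)) = true) := fun h =>
          hmem (by rw [← hkeys1]; exact (PySem.Dict.contains_iff_mem_keys _ _).mp h)
        simpa using this
      have hcont2 : P.2.contains (gOf genres (j:Int)) = false := by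
        have : ¬ (P.2.contains (gOf genres (j:Int)) = true) := fun h =>
          hmem (by rw [← hkeys2]; exact (PySem.Dict.contains_iff_mem_keys _ _).mp h)
        simpa using this
      simp only [hcont, if_false, Bool.false_eq_true]
      have hT0 : Tof genres plays j (gOf genres (j:Int)) = 0 := by
        unfold Tof
        rw [(Idxs_eq_nil genres j _).mpr hmem]
        rfl
      constructor
      · rw [PySem.Dict.items_insert_of_not_contains _ _ hcont, h1,
          Kof_succ_new genres j hmem, List.map_append]
        congr 1
        · apply List.map_congr_left
          intro g' hg'
          have he : gOf genres (j:Int) ≠ g' := fun h => hmem (h ▸ hg')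
          simp [Tof_succ, he]
        · simp [Tof_succ, hT0]
      · rw [PySem.Dict.items_insert_of_not_contains _ _ hcont2, h2,
          Kof_succ_new genres j hmem, List.map_append]
        congr 1
        · apply List.map_congr_left
          intro g' hg'
          rw [Fof_succ_mem genres j g' hg']
        · simp [Fof_succ_new genres j _ hmem rfl]

-- ---------- the dictionaries built by A's loop ----------

theorem Rng_def (j : Nat) : PySem.List.pyRange 0 (j:Int) 1 = Rng j := rfl

theorem cnt_items (genres : List String) (plays : List Int) (j : Nat) :
    ((Rng j).foldl (fun (d : PySem.Dict String Int) i =>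
        d.modify (gOf genres i) 0 (fun c => c + pOf plays i)) PySem.Dict.empty).items
      = (Kof genres j).map (fun g => (g, Tof genres plays j g)) := by
  have hkeys : ((Rng j).foldl (fun (d : PySem.Dict String Int) i =>
      d.modify (gOf genres i) 0 (fun c => c + pOf plays i)) PySem.Dict.empty).keys
      = Kof genres j := by
    rw [PySem.Dict.keys_foldl_modify_key (Rng j) (gOf genres) 0
      (fun d i => fun c => c + pOf plays i) PySem.Dict.empty]
    simp [PySem.Dict.keys, PySem.Dict.empty, PySem.Set.update, Kof, PySem.Set.ofList_eq_foldl]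
  have hnd : ((Rng j).foldl (fun (d : PySem.Dict String Int) i =>
      d.modify (gOf genres i) 0 (fun c => c + pOf plays i)) PySem.Dict.empty).keys.Nodup := by
    rw [hkeys]; exact Kof_nodup genres j
  rw [PySem.Dict.items_eq_map_keys _ hnd 0, hkeys]
  apply List.map_congr_left
  intro g hg
  rw [getD_foldl_modify_add (gOf genres) (pOf plays) (Rng j) PySem.Dict.empty g]
  simp [PySem.Dict.getD_empty, Tof, Idxs]

theorem dic_getD (genres : List String) (plays : List Int) (j : Nat) (g : String) :
    ((Rng j).foldl (fun (d : PySem.Dict String (List (Int × Int))) i =>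
        d.modify (gOf genres i) [] (fun l => l ++ [(pOf plays i, i)])) PySem.Dict.empty).getD g []
      = Lp genres plays j g := by
  have hmap : (Rng j).foldl (fun (d : PySem.Dict String (List (Int × Int))) i =>
        d.modify (gOf genres i) [] (fun l => l ++ [(pOf plays i, i)])) PySem.Dict.empty
      = ((Rng j).map (fun i => (gOf genres i, (pOf plays i, i)))).foldl
          (fun d p => d.modify p.1 [] (fun l => l ++ [p.2])) PySem.Dict.empty := by
    rw [List.foldl_map]
  rw [hmap, PySem.Dict.getD_foldl_modify_append]
  simp only [PySem.Dict.getD_empty, List.nil_append, List.filter_map, Function.comp_def,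
    List.map_map, Lp, Idxs]

-- ---------- per-genre facts ----------

theorem Idxs_nodup (genres : List String) (j : Nat) (g : String) : (Idxs genres j g).Nodup :=
  (Rng_nodup j).filter _

theorem SLf_perm (genres : List String) (plays : List Int) (j : Nat) (g : String) :
    ((SLf genres plays j g).map (fun x => x.2)).Perm (Idxs genres j g) := by
  have h1 := (PySem.List.sorted2_perm (Lp genres plays j g)
    (fun x => -x.1) (fun x => x.2) false).map (fun x => x.2)
  have h2 : (Lp genres plays j g).map (fun x => (x.2 : Int)) = Idxs genres j g := by
    simp [Lp, List.map_map, Function.comp_def]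
  rw [← h2]
  exact h1

theorem SLf_elem (genres : List String) (plays : List Int) (j : Nat) (g : String)
    (x : Int × Int) (hx : x ∈ SLf genres plays j g) :
    x.1 = pOf plays x.2 ∧ gOf genres x.2 = g ∧ x.2 ∈ Idxs genres j g := by
  have : x ∈ Lp genres plays j g :=
    (PySem.List.sorted2_perm _ _ _ _).mem_iff.mp hx
  obtain ⟨i, hi, rfl⟩ := List.mem_map.mp this
  exact ⟨rfl, ((mem_Idxs genres j g i).mp hi).2, hi⟩

theorem GOf_perm (genres : List String) (plays : List Int) (j : Nat) :
    (GOf genres plays j).Perm (Kof genres j) :=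
  PySem.List.sorted_perm _ _ _

theorem GOf_nodup (genres : List String) (plays : List Int) (j : Nat) :
    (GOf genres plays j).Nodup :=
  (GOf_perm genres plays j).nodup_iff.mpr (Kof_nodup genres j)

-- ---------- B's single global sort names the concatenation of A's per-genre sorts ----------

theorem Idxs_decide (genres : List String) (j : Nat) (g : String) :
    Idxs genres j g = (Rng j).filter (fun i => decide (gOf genres i = g)) := by
  unfold Idxs
  congr 1

theorem order_perm (genres : List String) (plays : List Int) (j : Nat) :
    ((GOf genres plays j).flatMap
      (fun g => (SLf genres plays j g).map (fun x => x.2))).Perm (Rng j) := by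
  have h1 : ((GOf genres plays j).flatMap
      (fun g => (SLf genres plays j g).map (fun x => x.2))).Perm
      ((GOf genres plays j).flatMap (fun g => Idxs genres j g)) :=
    List.Perm.flatMap_left _ (fun g _ => SLf_perm genres plays j g)
  have h2 : ((GOf genres plays j).flatMap (fun g => Idxs genres j g)).Perm
      ((Kof genres j).flatMap (fun g => Idxs genres j g)) :=
    List.Perm.flatMap_right _ (GOf_perm genres plays j)
  have h3 : (Rng j).Perm ((Kof genres j).flatMap (fun g => Idxs genres j g)) := by
    have := partition_perm (gOf genres) (Rng j) (Kof genres j) (Kof_nodup genres j)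
      (fun i hi => by
        rw [mem_Kof]
        exact ⟨i, (mem_Rng j i).mp hi, rfl⟩)
    simpa [← Idxs_decide] using this
  exact (h1.trans h2).trans h3.symm

theorem order_pairwise (genres : List String) (plays : List Int) (j : Nat) :
    ((GOf genres plays j).flatMap
      (fun g => (SLf genres plays j g).map (fun x => x.2))).Pairwise
      (fun a b =>
        toLex (-(Tof genres plays j (gOf genres a)),
          toLex (Fof genres j (gOf genres a), toLex (-(pOf plays a), a))) <
        toLex (-(Tof genres plays j (gOf genres b)),
          toLex (Fof genres j (gOf genres b), toLex (-(pOf plays b), b)))) := by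
  rw [List.flatMap_def, List.pairwise_flatten]
  constructor
  · -- within one block
    intro bl hbl
    obtain ⟨g, hg, rfl⟩ := List.mem_map.mp hbl
    rw [List.pairwise_map]
    have hle : (SLf genres plays j g).Pairwise
        (fun (x y : Int × Int) => toLex (-x.1, x.2) ≤ toLex (-y.1, y.2)) := by
      unfold SLf
      rw [sorted2_eq_sorted_lex]
      exact PySem.List.sorted_pairwise _ (fun (x : Int × Int) => toLex (-x.1, x.2))
    have hnd : ((SLf genres plays j g).map (fun x => x.2)).Nodup :=
      (SLf_perm genres plays j g).nodup_iff.mpr (Idxs_nodup genres j g)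
    have hne : (SLf genres plays j g).Pairwise (fun x y => x.2 ≠ y.2) := by
      rw [← List.pairwise_map (f := fun (x : Int × Int) => x.2) (R := Ne)]
      exact hnd
    refine ((hle.and hne).imp_of_mem ?_)
    intro x y hx hy hxy
    obtain ⟨hx1, hx2, -⟩ := SLf_elem genres plays j g x hx
    obtain ⟨hy1, hy2, -⟩ := SLf_elem genres plays j g y hy
    rw [hx2, hy2, ← hx1, ← hy1]
    have hlt : toLex (-x.1, x.2) < toLex (-y.1, y.2) :=
      lt_of_le_of_ne hxy.1 (fun hEq => hxy.2 (congrArg (fun z => (ofLex z).2) hEq))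
    rw [Prod.Lex.lt_iff]
    right
    refine ⟨rfl, ?_⟩
    rw [Prod.Lex.lt_iff]
    right
    exact ⟨rfl, hlt⟩
  · -- across blocks
    rw [List.pairwise_map]
    have hGO : (GOf genres plays j).Pairwise
        (fun a b => toLex (-(Tof genres plays j a), Fof genres j a) ≤
          toLex (-(Tof genres plays j b), Fof genres j b)) :=
      PySem.List.sorted_pairwise _ _
    have hnd : (GOf genres plays j).Pairwise (fun a b => a ≠ b) :=
      GOf_nodup genres plays j
    refine ((hGO.and hnd).imp_of_mem ?_)
    intro g g' hgm hgm' hgg x hx y hy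
    have hgK : g ∈ Kof genres j := (GOf_perm genres plays j).mem_iff.mp hgm
    have hgK' : g' ∈ Kof genres j := (GOf_perm genres plays j).mem_iff.mp hgm'
    obtain ⟨xi, hxi, rfl⟩ := List.mem_map.mp hx
    obtain ⟨yi, hyi, rfl⟩ := List.mem_map.mp hy
    obtain ⟨-, hx2, -⟩ := SLf_elem genres plays j g xi hxi
    obtain ⟨-, hy2, -⟩ := SLf_elem genres plays j g' yi hyi
    rw [hx2, hy2]
    have hstrict : toLex (-(Tof genres plays j g), Fof genres j g) <
        toLex (-(Tof genres plays j g'), Fof genres j g') := by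
      refine lt_of_le_of_ne hgg.1 (fun hEq => hgg.2 ?_)
      have hF : Fof genres j g = Fof genres j g' := congrArg (fun z => (ofLex z).2) hEq
      exact Fof_inj genres j g g' hgK hgK' hF
    rw [Prod.Lex.lt_iff] at hstrict ⊢
    rcases hstrict with h | ⟨h1, h2⟩
    · exact Or.inl h
    · right
      refine ⟨h1, ?_⟩
      rw [Prod.Lex.lt_iff]
      exact Or.inl h2

theorem order_eq (genres : List String) (plays : List Int) (D1 D2 : PySem.Dict String Int)
    (j : Nat)
    (hT : ∀ g ∈ Kof genres j, D1.getD g 0 = Tof genres plays j g)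
    (hF : ∀ g ∈ Kof genres j, D2.getD g 0 = Fof genres j g) :
    PySem.List.sorted (Rng j)
      (fun i => toLex (-(D1.getD (gOf genres i) 0),
        toLex (D2.getD (gOf genres i) 0, toLex (-(pOf plays i), i)))) false
      = (GOf genres plays j).flatMap (fun g => (SLf genres plays j g).map (fun x => x.2)) := by
  apply PySem.List.sorted_eq_of_perm_of_pairwise_lt _ _ _ (order_perm genres plays j)
  refine (order_pairwise genres plays j).imp_of_mem ?_
  intro a b ha hb hab
  have haR : a ∈ Rng j := (order_perm genres plays j).mem_iff.mp ha
  have hbR : b ∈ Rng j := (order_perm genres plays j).mem_iff.mp hb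
  have haK : gOf genres a ∈ Kof genres j := by
    rw [mem_Kof]; exact ⟨a, (mem_Rng j a).mp haR, rfl⟩
  have hbK : gOf genres b ∈ Kof genres j := by
    rw [mem_Kof]; exact ⟨b, (mem_Rng j b).mp hbR, rfl⟩
  rw [hT _ haK, hT _ hbK, hF _ haK, hF _ hbK]
  exact hab

-- ---------- B's counted pass keeps the first two entries of each genre block ----------

theorem blockFold (genres : List String) (g : String) (js : List Int)
    (hall : ∀ i ∈ js, gOf genres i = g) (ans : List Int) (d : PySem.Dict String Int)
    (c : Int) (hc : d.getD g 0 = c) (hc0 : 0 ≤ c) (hc2 : c ≤ 2) :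
    (js.foldl (fun (st : List Int × PySem.Dict String Int) i =>
        if st.2.getD (gOf genres i) 0 < 2 then
          (st.1 ++ [i], st.2.insert (gOf genres i) (st.2.getD (gOf genres i) 0 + 1))
        else st) (ans, d)).1 = ans ++ js.take (2 - c).toNat ∧
    ∀ g', (js.foldl (fun (st : List Int × PySem.Dict String Int) i =>
        if st.2.getD (gOf genres i) 0 < 2 then
          (st.1 ++ [i], st.2.insert (gOf genres i) (st.2.getD (gOf genres i) 0 + 1))
        else st) (ans, d)).2.getD g' 0 =
      if g' = g then min 2 (c + js.length) else d.getD g' 0 := by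
  induction js generalizing ans d c with
  | nil =>
    constructor
    · simp
    · intro g'
      by_cases h : g' = g
      · subst h
        simp [hc]
        omega
      · simp [h]
  | cons i js ih =>
    have hgi : gOf genres i = g := hall i (by simp)
    simp only [List.foldl_cons, hgi, hc]
    by_cases hlt : c < 2
    · rw [if_pos hlt]
      obtain ⟨ih1, ih2⟩ := ih (fun x hx => hall x (by simp [hx])) (ans ++ [i])
        (d.insert g (c + 1)) (c + 1) (by rw [PySem.Dict.getD_insert]; simp)
        (by omega) (by omega)
      constructor
      · rw [ih1]
        have htn : (2 - c).toNat = (2 - (c + 1)).toNat + 1 := by omega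
        rw [htn, List.take_succ_cons, List.append_assoc, List.singleton_append]
      · intro g'
        rw [ih2 g']
        by_cases h : g' = g
        · subst h
          simp only [List.length_cons]
          push_cast
          omega
        · simp only [if_neg h]
          rw [PySem.Dict.getD_insert, if_neg h]
    · rw [if_neg hlt]
      obtain ⟨ih1, ih2⟩ := ih (fun x hx => hall x (by simp [hx])) ans d c hc hc0 hc2
      constructor
      · rw [ih1]
        have h0 : (2 - c).toNat = 0 := by omega
        rw [h0]
        simp
      · intro g'
        rw [ih2 g']
        by_cases h : g' = g
        · subst h
          simp only [List.length_cons]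
          push_cast
          omega
        · simp [h]

theorem gsFold (genres : List String) (gs : List String) (bl : String → List Int)
    (hnd : gs.Nodup) (hall : ∀ g ∈ gs, ∀ i ∈ bl g, gOf genres i = g)
    (ans : List Int) (d : PySem.Dict String Int) (hd : ∀ g ∈ gs, d.getD g 0 = 0) :
    ((gs.flatMap bl).foldl (fun (st : List Int × PySem.Dict String Int) i =>
        if st.2.getD (gOf genres i) 0 < 2 then
          (st.1 ++ [i], st.2.insert (gOf genres i) (st.2.getD (gOf genres i) 0 + 1))
        else st) (ans, d)).1 = ans ++ gs.flatMap (fun g => (bl g).take 2) := by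
  induction gs generalizing ans d with
  | nil => simp
  | cons g gs ih =>
    obtain ⟨b1, b2⟩ := blockFold genres g (bl g) (hall g (by simp)) ans d 0
      (hd g (by simp)) (by omega) (by omega)
    have ht2 : ((2:Int) - 0).toNat = 2 := rfl
    rw [ht2] at b1
    set R := (bl g).foldl (fun (st : List Int × PySem.Dict String Int) i =>
        if st.2.getD (gOf genres i) 0 < 2 then
          (st.1 ++ [i], st.2.insert (gOf genres i) (st.2.getD (gOf genres i) 0 + 1))
        else st) (ans, d) with hR
    have hd' : ∀ g' ∈ gs, R.2.getD g' 0 = 0 := by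
      intro g' hg'
      rw [b2 g']
      have hne : g' ≠ g := by
        rintro rfl
        exact (List.nodup_cons.mp hnd).1 hg'
      rw [if_neg hne]
      exact hd g' (by simp [hg'])
    have hconv : (((g :: gs).flatMap bl).foldl (fun (st : List Int × PySem.Dict String Int) i =>
        if st.2.getD (gOf genres i) 0 < 2 then
          (st.1 ++ [i], st.2.insert (gOf genres i) (st.2.getD (gOf genres i) 0 + 1))
        else st) (ans, d)) = ((gs.flatMap bl).foldl (fun (st : List Int × PySem.Dict String Int) i =>
        if st.2.getD (gOf genres i) 0 < 2 then
          (st.1 ++ [i], st.2.insert (gOf genres i) (st.2.getD (gOf genres i) 0 + 1))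
        else st) (R.1, R.2)) := by
      rw [List.flatMap_cons, List.foldl_append]
    rw [hconv, ih (hnd.of_cons) (fun g' hg' i hi => hall g' (by simp [hg']) i hi) R.1 R.2 hd',
      b1, List.flatMap_cons, List.append_assoc]

theorem solutionTop2_ge (i : Nat) (hi : 2 ≤ i) (l : List (Int × Int)) (ans : List Int) :
    solutionTop2 i l ans = ans := by
  cases l with
  | nil => rfl
  | cons p rest => simp [solutionTop2, hi]


theorem solutionTop2_zero (l : List (Int × Int)) (ans : List Int) :
    solutionTop2 0 l ans = ans ++ (l.take 2).map (fun x => x.2) := by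
  match l with
  | [] => simp [solutionTop2]
  | [p] => simp [solutionTop2]
  | p :: q :: rest => simp [solutionTop2, solutionTop2_ge]


theorem sorted_cnt (genres : List String) (plays : List Int) (j : Nat) :
    PySem.List.sorted ((Kof genres j).map (fun g => (g, Tof genres plays j g)))
      (fun x => -x.2) false
      = (GOf genres plays j).map (fun g => (g, Tof genres plays j g)) := by
  rw [sorted_map (fun g => (g, Tof genres plays j g)) (Kof genres j) (fun x => -x.2)]
  rw [stable_lex (fun a => -(Tof genres plays j a)) (Fof genres j) (Kof genres j)
    (KFpairwise genres j).1]
  rfl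

theorem solution_eq_canon (genres : List String) (plays : List Int) :
    solution genres plays = canon genres plays := by
  simp only [solution, gOf_def, pOf_def, Rng_def]
  rw [PySem.List.foldl_prod_mk
    (f := fun (d : PySem.Dict String (List (Int × Int))) i =>
      d.modify (gOf genres i) [] (fun l => l ++ [(pOf plays i, i)]))
    (g := fun (d : PySem.Dict String Int) i =>
      d.modify (gOf genres i) 0 (fun c => c + pOf plays i))]
  simp only []
  rw [cnt_items genres plays genres.length, sorted_cnt genres plays genres.length]
  simp only [solutionTop2_zero]
  rw [PySem.List.foldl_append_eq_flatMap, List.nil_append, List.flatMap_map]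
  simp only [dic_getD]
  rfl

-- ---------- structure of B ----------

theorem solution_alt_eq_canon (genres : List String) (plays : List Int) :
    solution_alt genres plays = canon genres plays := by
  simp only [solution_alt, gOf_def, pOf_def, Rng_def]
  obtain ⟨h1, h2⟩ := Bdicts genres plays genres.length
  set P := ((Rng genres.length).foldl
      (fun (st : PySem.Dict String Int × PySem.Dict String Int) i =>
        if st.1.contains (gOf genres i) then
          (st.1.modify (gOf genres i) 0 (fun c => c + pOf plays i), st.2)
        else
          (st.1.insert (gOf genres i) (pOf plays i), st.2.insert (gOf genres i) i))
      (PySem.Dict.empty, PySem.Dict.empty)) with hP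
  have hnd1 : P.1.keys.Nodup := by
    simp only [PySem.Dict.keys, h1, List.map_map, Function.comp_def]
    simpa using Kof_nodup genres genres.length
  have hnd2 : P.2.keys.Nodup := by
    simp only [PySem.Dict.keys, h2, List.map_map, Function.comp_def]
    simpa using Kof_nodup genres genres.length
  have hT : ∀ g ∈ Kof genres genres.length, P.1.getD g 0 = Tof genres plays genres.length g :=
    fun g hg => PySem.Dict.getD_of_mem_items _ (by rw [h1]; exact List.mem_map_of_mem hg) hnd1 0
  have hF : ∀ g ∈ Kof genres genres.length, P.2.getD g 0 = Fof genres genres.length g :=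
    fun g hg => PySem.Dict.getD_of_mem_items _ (by rw [h2]; exact List.mem_map_of_mem hg) hnd2 0
  rw [order_eq genres plays P.1 P.2 genres.length hT hF]
  have hall : ∀ g ∈ GOf genres plays genres.length,
      ∀ i ∈ (SLf genres plays genres.length g).map (fun x => x.2), gOf genres i = g := by
    intro g hg i hi
    obtain ⟨x, hx, rfl⟩ := List.mem_map.mp hi
    exact (SLf_elem genres plays genres.length g x hx).2.1
  rw [gsFold genres (GOf genres plays genres.length)
    (fun g => (SLf genres plays genres.length g).map (fun x => x.2))
    (GOf_nodup genres plays genres.length) hall [] PySem.Dict.empty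
    (fun g _ => PySem.Dict.getD_empty g 0), List.nil_append]
  unfold canon
  apply List.flatMap_congr
  intro g hg
  rw [List.map_take]


-- ===== VERDICT (by name: the statement is the Claim_ definition above) =====
theorem solution_spec : Claim_equal_solution := by
  intro genres plays _ _
  unfold Spec_solution
  rw [solution_eq_canon, solution_alt_eq_canon]
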